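-- pv_equiv track=rewrite | github.com/ouharu/code-practice | paiza/wrong_set/B117.py | find_sub_asdlst
-- ===== SOURCE A (Python) =====
-- def find_sub_asdlst(num_lst:list)->list:
--     idx = 0
--     num_count = len(num_lst)
--     res = []
--     while idx < num_count - 1:
--         if num_lst[idx] <= num_lst[idx+1]:
--             start = idx
--             while idx+1 < num_count and num_lst[idx] <= num_lst[idx+1]:
--                 idx += 1
--             end = idx
--             res.extend(num_lst[start:end+1])
--
--         idx += 1
--     return res
-- ===== SOURCE B (Python) =====
-- def find_sub_asdlst(num_lst: list) -> list:
--     # element-centric: keep x iff it participates in a non-decreasing adjacent pair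
--     n = len(num_lst)
--     return [x for i, x in enumerate(num_lst)
--             if (i > 0 and num_lst[i-1] <= x) or (i + 1 < n and x <= num_lst[i+1])]
-- ===== Notes on version B (the rewrite author's own statement) =====
-- stated objective: simpler
-- what changed: Replaces A's boundary-detecting outer/inner while loops with slicing and extend by a single comprehension keeping each element iff it forms a non-decreasing pair with a neighbour.
import Mathlib
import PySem

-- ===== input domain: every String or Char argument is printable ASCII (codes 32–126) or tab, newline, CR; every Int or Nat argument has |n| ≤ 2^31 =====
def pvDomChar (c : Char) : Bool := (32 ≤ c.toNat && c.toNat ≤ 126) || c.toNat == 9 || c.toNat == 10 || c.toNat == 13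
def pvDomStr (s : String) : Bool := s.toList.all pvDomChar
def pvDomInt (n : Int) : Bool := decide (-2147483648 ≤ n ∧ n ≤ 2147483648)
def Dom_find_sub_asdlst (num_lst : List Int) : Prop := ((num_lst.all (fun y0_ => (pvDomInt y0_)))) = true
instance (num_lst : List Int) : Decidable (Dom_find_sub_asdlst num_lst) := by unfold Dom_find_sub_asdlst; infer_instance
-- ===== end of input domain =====

-- B replaces A's run-boundary while loops and slicing by a single comprehension keeping each
-- element iff it forms a non-decreasing pair with a neighbour (objective: simpler).

-- ===== PORT A =====
-- inner while: 'while idx+1 < num_count and num_lst[idx] <= num_lst[idx+1]: idx += 1'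
-- (idx is a loop counter that starts at 0 and only increases, so Nat models the Python int
--  exactly; indexing is guarded in-range by the loop condition, so getD is exact)
def pvInnerA (a : List Int) (idx : Nat) : Nat :=
  if idx + 1 < a.length ∧ a.getD idx 0 ≤ a.getD (idx + 1) 0 then pvInnerA a (idx + 1) else idx
termination_by a.length - idx
decreasing_by omega

-- used by pvOuterA's termination proof
theorem pvInnerA_ge (a : List Int) (idx : Nat) : idx ≤ pvInnerA a idx := by
  unfold pvInnerA
  split
  · have := pvInnerA_ge a (idx + 1); omega
  · exact le_refl _
termination_by a.length - idx
decreasing_by omega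

-- outer while: scan; on an ascent at idx, advance to the run's end, extend res with the slice
def pvOuterA (a : List Int) (idx : Nat) : List Int :=
  if h : idx + 1 < a.length then
    if a.getD idx 0 ≤ a.getD (idx + 1) 0 then
      let e := pvInnerA a idx
      PySem.List.slice a (some (idx : Int)) (some ((e : Int) + 1)) ++ pvOuterA a (e + 1)
    else pvOuterA a (idx + 1)
  else []
termination_by a.length - idx
decreasing_by
  · have := pvInnerA_ge a idx; omega
  · omega

def find_sub_asdlst (num_lst : List Int) : List Int := pvOuterA num_lst 0

-- ===== PORT B =====
-- [x for i, x in enumerate(num_lst) if (i > 0 and num_lst[i-1] <= x) or (i+1 < n and x <= num_lst[i+1])]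
def find_sub_asdlst_alt (num_lst : List Int) : List Int :=
  ((PySem.List.enumerate num_lst 0).filter (fun p =>
      (decide (0 < p.1) && decide (PySem.List.pyGetD num_lst (p.1 - 1) 0 ≤ p.2)) ||
      (decide (p.1 + 1 < (num_lst.length : Int)) && decide (p.2 ≤ PySem.List.pyGetD num_lst (p.1 + 1) 0)))).map (·.2)

-- ===== PRECONDITION & SPEC =====
def Spec_find_sub_asdlst (num_lst : List Int) (out : List Int) : Prop := out = find_sub_asdlst_alt num_lst
instance (num_lst : List Int) (out : List Int) : Decidable (Spec_find_sub_asdlst num_lst out) := by unfold Spec_find_sub_asdlst; infer_instance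

-- ===== CLAIM (what is proved, stated in full; the proofs are below) =====
def Claim_equal_find_sub_asdlst : Prop := ∀ (num_lst : List Int), Dom_find_sub_asdlst num_lst → Spec_find_sub_asdlst num_lst (find_sub_asdlst num_lst)

-- ===== LEMMAS AND PROOFS =====

-- the element-keeping predicate of B, on Nat indices
def pvKeep (a : List Int) (i : Nat) : Bool :=
  (decide (0 < i) && decide (a.getD (i - 1) 0 ≤ a.getD i 0)) ||
  (decide (i + 1 < a.length) && decide (a.getD i 0 ≤ a.getD (i + 1) 0))

-- B's result restricted to indices ≥ idx
def pvSeg (a : List Int) (idx : Nat) : List Int :=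
  ((List.range' idx (a.length - idx)).filter (pvKeep a)).map (fun i => a.getD i 0)

theorem pvInnerA_lt (a : List Int) (idx : Nat) (h : idx < a.length) : pvInnerA a idx < a.length := by
  unfold pvInnerA
  split
  · exact pvInnerA_lt a (idx + 1) (by omega)
  · exact h
termination_by a.length - idx
decreasing_by omega

theorem pvInnerA_chain (a : List Int) (idx : Nat) :
    ∀ j, idx ≤ j → j < pvInnerA a idx → a.getD j 0 ≤ a.getD (j + 1) 0 := by
  unfold pvInnerA
  split
  · intro j h1 h2
    rcases Nat.eq_or_lt_of_le h1 with rfl | h1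
    · rename_i hc; exact hc.2
    · exact pvInnerA_chain a (idx + 1) j h1 h2
  · intro j h1 h2; omega
termination_by a.length - idx
decreasing_by omega

theorem pvInnerA_stop (a : List Int) (idx : Nat) :
    ¬ (pvInnerA a idx + 1 < a.length ∧ a.getD (pvInnerA a idx) 0 ≤ a.getD (pvInnerA a idx + 1) 0) := by
  unfold pvInnerA
  split
  · exact pvInnerA_stop a (idx + 1)
  · assumption
termination_by a.length - idx
decreasing_by omega

theorem pvMapRangeGetD (a : List Int) (k : Nat) :
    ∀ s, s + k ≤ a.length → (List.range' s k).map (fun i => a.getD i 0) = (a.drop s).take k := by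
  induction k with
  | zero => intro s _; simp
  | succ k ih =>
    intro s hs
    have hlt : s < a.length := by omega
    rw [List.range'_succ, List.map_cons, ih (s + 1) (by omega),
        List.drop_eq_getElem_cons hlt, List.take_succ_cons]
    rw [List.getD_eq_getElem a 0 hlt]

-- main invariant: from any scan start idx that is 0, past the end, or preceded by a descent,
-- A's outer loop produces exactly B's kept elements at indices ≥ idx
theorem pvMain (a : List Int) (k : Nat) :
    ∀ idx, a.length - idx ≤ k →
      (idx = 0 ∨ a.length ≤ idx ∨ a.getD idx 0 < a.getD (idx - 1) 0) →
      pvOuterA a idx = pvSeg a idx := by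
  induction k with
  | zero =>
    intro idx hk hE
    rw [pvOuterA, pvSeg]
    have hn : a.length ≤ idx := by omega
    rw [dif_neg (by omega)]
    simp [Nat.sub_eq_zero_of_le hn]
  | succ k ih =>
    intro idx hk hE
    rw [pvOuterA]
    by_cases h : idx + 1 < a.length
    · rw [dif_pos h]
      by_cases hasc : a.getD idx 0 ≤ a.getD (idx + 1) 0
      · rw [if_pos hasc]
        show PySem.List.slice a (some ((idx : Nat) : Int)) (some (((pvInnerA a idx : Nat) : Int) + 1)) ++
            pvOuterA a (pvInnerA a idx + 1) = pvSeg a idx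
        have hge : idx + 1 ≤ pvInnerA a idx := by
          rw [pvInnerA, if_pos ⟨h, hasc⟩]; exact pvInnerA_ge a (idx + 1)
        have hel : pvInnerA a idx < a.length := pvInnerA_lt a idx (by omega)
        have hchain := pvInnerA_chain a idx
        have hstop := pvInnerA_stop a idx
        generalize hgen : pvInnerA a idx = e at hge hel hchain hstop ⊢
        rw [ih (e + 1) (by omega) (by
          rcases Decidable.not_and_iff_not_or_not.mp hstop with h1 | h1
          · exact Or.inr (Or.inl (by omega))
          · exact Or.inr (Or.inr (by simpa using lt_of_not_ge h1)))]
        have hcast : (((e : Nat) : Int) + 1) = (((e + 1 : Nat) : Int)) := by push_cast; ring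
        rw [hcast, PySem.List.slice_natCast]
        unfold pvSeg
        have hsplit : List.range' idx (a.length - idx) =
            List.range' idx (e + 1 - idx) ++ List.range' (e + 1) (a.length - (e + 1)) := by
          rw [show a.length - idx = (e + 1 - idx) + (a.length - (e + 1)) from by omega,
              ← List.range'_append, show idx + 1 * (e + 1 - idx) = e + 1 from by omega]
        rw [hsplit, List.filter_append, List.map_append]
        congr 1
        have hall : ∀ i ∈ List.range' idx (e + 1 - idx), pvKeep a i = true := by
          intro i hi
          rw [List.mem_range'] at hi
          obtain ⟨m, hm, rfl⟩ := hi
          simp only [one_mul]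
          unfold pvKeep
          rcases Nat.eq_zero_or_pos m with rfl | hm0
          · simp only [Bool.or_eq_true, Bool.and_eq_true, decide_eq_true_eq]
            exact Or.inr ⟨by omega, by simpa using hasc⟩
          · simp only [Bool.or_eq_true, Bool.and_eq_true, decide_eq_true_eq]
            refine Or.inl ⟨by omega, ?_⟩
            have := hchain (idx + m - 1) (by omega) (by omega)
            simpa [show idx + m - 1 + 1 = idx + m from by omega] using this
        rw [List.filter_eq_self.mpr hall]
        exact (pvMapRangeGetD a (e + 1 - idx) idx (by omega)).symm
      · rw [if_neg hasc]
        rw [ih (idx + 1) (by omega) (Or.inr (Or.inr (by simpa using lt_of_not_ge hasc)))]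
        unfold pvSeg
        have hr : List.range' idx (a.length - idx) = idx :: List.range' (idx + 1) (a.length - (idx + 1)) := by
          have h1 : a.length - idx = (a.length - (idx + 1)) + 1 := by omega
          rw [h1, List.range'_succ]
        rw [hr, List.filter_cons]
        have hkf : pvKeep a idx = false := by
          unfold pvKeep
          simp only [Bool.or_eq_false_iff, Bool.and_eq_false_iff, decide_eq_false_iff_not]
          constructor
          · rcases hE with rfl | hE | hE
            · exact Or.inl (by omega)
            · omega
            · exact Or.inr (not_le.mpr hE)
          · exact Or.inr hasc
        rw [hkf]
        simp
    · rw [dif_neg h]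
      unfold pvSeg
      by_cases hn : a.length ≤ idx
      · simp [Nat.sub_eq_zero_of_le hn]
      · have hidx : idx = a.length - 1 ∧ a.length - idx = 1 := by omega
        rw [hidx.2]
        have : List.range' idx 1 = [idx] := by simp
        rw [this, List.filter_cons]
        have hkf : pvKeep a idx = false := by
          unfold pvKeep
          simp only [Bool.or_eq_false_iff, Bool.and_eq_false_iff, decide_eq_false_iff_not]
          constructor
          · rcases hE with rfl | hE | hE
            · exact Or.inl (by omega)
            · omega
            · exact Or.inr (not_le.mpr hE)
          · exact Or.inl (by omega)
        rw [hkf]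
        simp

-- B's port equals the Nat-index formulation pvSeg at 0
theorem pvAltEq (a : List Int) : find_sub_asdlst_alt a = pvSeg a 0 := by
  unfold find_sub_asdlst_alt pvSeg
  rw [PySem.List.enumerate_eq_map_pyRange a (0 : Int)]
  have hlen : PySem.List.len a = ((a.length : Nat) : Int) := rfl
  rw [hlen, PySem.List.pyRange_zero_natCast]
  rw [List.map_map, List.filter_map, List.map_map]
  simp only [Nat.sub_zero, List.range_eq_range']
  congr 1
  · funext i
    simp [Function.comp, PySem.List.pyGetD_natCast]
  · apply List.filter_congr
    intro i _
    simp only [Function.comp_apply, pvKeep]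
    have h1 : ((i : Int) + 1) = ((i + 1 : Nat) : Int) := by push_cast; ring
    rcases Nat.eq_zero_or_pos i with rfl | h0
    · simp [pysem, List.getD_eq_getElem?_getD]
    · have h2 : ((i : Int) - 1) = ((i - 1 : Nat) : Int) := by omega
      simp only [h1, h2, PySem.List.pyGetD_natCast]
      simp only [List.getD_eq_getElem?_getD, Int.natCast_pos, Nat.cast_add, Nat.cast_one]
      rw [decide_eq_decide.mpr (show ((i : Int) + 1 < (a.length : Int)) ↔ (i + 1 < a.length) from by omega)]

-- ===== VERDICT (by name: the statement is the Claim_ definition above) =====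
theorem find_sub_asdlst_spec : Claim_equal_find_sub_asdlst := by
  intro num_lst _
  unfold Spec_find_sub_asdlst find_sub_asdlst
  rw [pvAltEq, pvMain num_lst num_lst.length 0 (by omega) (Or.inl rfl)]
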